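-- pv_equiv track=rewrite | github.com/baddyscience/develop | algorithmTopic/数字分组求偶数和.py | solution
-- ===== SOURCE A (Python) =====
-- def solution(numbers):
--     n = len(numbers)
--     dp = [[0, 0] for _ in range(n + 1)]
--
--     dp[0][0] = 1
--     dp[0][1] = 0
--
--     for i in range(1, n + 1):
--         even_count = 0
--         odd_count = 0
--
--         odd_count = sum(1 for digit in str(numbers[i - 1]) if int(digit) % 2 != 0)
--         even_count = sum(1 for digit in str(numbers[i - 1]) if int(digit) % 2 == 0)
--
--         dp[i][0] = dp[i - 1][0] * even_count + dp[i - 1][1] * odd_count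
--         dp[i][1] = dp[i - 1][0] * odd_count + dp[i - 1][1] * even_count
--
--     return dp[n][0]
-- ===== SOURCE B (Python) =====
-- def solution(numbers):
--     # Two running products replace the 2-state DP table:
--     # P_total = prod(e+o), P_diff = prod(e-o); answer = (P_total + P_diff) // 2.
--     p_total = 1
--     p_diff = 1
--     for number in numbers:
--         e = 0
--         o = 0
--         for digit in str(number):
--             if int(digit) % 2 == 0:
--                 e += 1
--             else:
--                 o += 1
--         p_total *= e + o
--         p_diff *= e - o
--     return (p_total + p_diff) // 2
-- ===== Notes on version B (the rewrite author's own statement) =====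
-- stated objective: simpler
-- what changed: Replaces the two-state DP table with two running products (total digit count and even-minus-odd digit count) and returns (P_total + P_diff) // 2, the closed-form eigen-decomposition of the per-number parity transition.
import Mathlib
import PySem

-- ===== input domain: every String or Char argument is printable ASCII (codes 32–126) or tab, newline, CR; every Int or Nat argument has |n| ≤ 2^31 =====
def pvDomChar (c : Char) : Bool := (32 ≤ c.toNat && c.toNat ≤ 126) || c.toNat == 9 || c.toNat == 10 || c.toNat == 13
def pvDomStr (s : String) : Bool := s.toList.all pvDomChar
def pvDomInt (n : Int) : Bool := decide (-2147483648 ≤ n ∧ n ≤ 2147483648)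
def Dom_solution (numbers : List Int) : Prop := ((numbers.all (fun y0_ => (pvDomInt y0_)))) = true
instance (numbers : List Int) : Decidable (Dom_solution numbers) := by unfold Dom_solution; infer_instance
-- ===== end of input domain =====

-- B replaces A's two-state DP table by two running products and a closed form; same cost, simpler.

-- ===== PORT A =====
-- int(digit) for a one-character string; exact for the digit characters str(n) produces
-- on the nonnegative numbers admitted by Pre_ (int('-') raises ValueError, hence Pre_).
def pvDigitInt (c : Char) : Int := (PySem.Int.ofStr? (String.ofList [c])).getD 0

-- odd_count = sum(1 for digit in str(x) if int(digit) % 2 != 0)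
def pvOddCount (x : Int) : Int :=
  (((PySem.Int.toStr x).toList.filter (fun c => PySem.Int.mod (pvDigitInt c) 2 ≠ 0)).length : Int)

-- even_count = sum(1 for digit in str(x) if int(digit) % 2 == 0)
def pvEvenCount (x : Int) : Int :=
  (((PySem.Int.toStr x).toList.filter (fun c => PySem.Int.mod (pvDigitInt c) 2 = 0)).length : Int)

-- the dp table is filled strictly sequentially (row i from row i-1, numbers[i-1]);
-- ported as a fold carrying the current row (dp[i][0], dp[i][1]); returns dp[n][0]
def solution (numbers : List Int) : Int :=
  (numbers.foldl
    (fun (dp : Int × Int) x =>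
      let even_count := pvEvenCount x
      let odd_count := pvOddCount x
      (dp.1 * even_count + dp.2 * odd_count, dp.1 * odd_count + dp.2 * even_count))
    (1, 0)).1

-- ===== PORT B =====
-- inner loop of Source B: e, o accumulated in one pass over str(number)
def pvCountEO (x : Int) : Int × Int :=
  (PySem.Int.toStr x).toList.foldl
    (fun (p : Int × Int) c =>
      if PySem.Int.mod (pvDigitInt c) 2 = 0 then (p.1 + 1, p.2) else (p.1, p.2 + 1))
    (0, 0)

def solution_alt (numbers : List Int) : Int :=
  let p :=
    numbers.foldl
      (fun (p : Int × Int) x =>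
        let eo := pvCountEO x
        (p.1 * (eo.1 + eo.2), p.2 * (eo.1 - eo.2)))
      (1, 1)
  PySem.Int.floordiv (p.1 + p.2) 2

-- ===== PRECONDITION & SPEC =====
-- Pre_ excludes lists containing a negative number: there str(x) starts with '-' and
-- int('-') raises ValueError in A (and in B, which iterates str(x) the same way).
def Pre_solution (numbers : List Int) : Prop := ∀ x ∈ numbers, 0 ≤ x
instance (numbers : List Int) : Decidable (Pre_solution numbers) := by
  unfold Pre_solution; infer_instance
def pvWitness_solution : List Int := ([12, 34, 0])

def Spec_solution (numbers : List Int) (out : Int) : Prop := out = solution_alt numbers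
instance (numbers : List Int) (out : Int) : Decidable (Spec_solution numbers out) := by unfold Spec_solution; infer_instance

-- ===== CLAIM (what is proved, stated in full; the proofs are below) =====
def Claim_equal_solution : Prop := ∀ (numbers : List Int), Dom_solution numbers → Pre_solution numbers → Spec_solution numbers (solution numbers)

-- ===== LEMMAS AND PROOFS =====

-- B's one-pass (e, o) accumulator equals the two filtered counts, for any predicate
theorem pvCount_go (P : Char → Prop) [DecidablePred P] (cs : List Char) (e o : Int) :
    cs.foldl (fun (t : Int × Int) c => if P c then (t.1 + 1, t.2) else (t.1, t.2 + 1)) (e, o)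
    = (e + ((cs.filter (fun c => decide (P c))).length : Int),
       o + ((cs.filter (fun c => decide (¬ P c))).length : Int)) := by
  induction cs generalizing e o with
  | nil => simp
  | cons c cs ih =>
    by_cases h : P c <;> simp [h, ih, Prod.ext_iff] <;> omega

theorem pvCountEO_eq (x : Int) : pvCountEO x = (pvEvenCount x, pvOddCount x) := by
  unfold pvCountEO pvEvenCount pvOddCount
  rw [pvCount_go (fun c => PySem.Int.mod (pvDigitInt c) 2 = 0)]
  simp

-- loop invariant: B's product pair is (sum, difference) of A's dp pair
theorem pv_inv (l : List Int) (a b : Int) :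
    l.foldl
      (fun (p : Int × Int) x =>
        (p.1 * ((pvCountEO x).1 + (pvCountEO x).2), p.2 * ((pvCountEO x).1 - (pvCountEO x).2)))
      (a + b, a - b)
    = ((l.foldl
          (fun (dp : Int × Int) x =>
            (dp.1 * pvEvenCount x + dp.2 * pvOddCount x, dp.1 * pvOddCount x + dp.2 * pvEvenCount x))
          (a, b)).1 + (l.foldl
          (fun (dp : Int × Int) x =>
            (dp.1 * pvEvenCount x + dp.2 * pvOddCount x, dp.1 * pvOddCount x + dp.2 * pvEvenCount x))
          (a, b)).2,
       (l.foldl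
          (fun (dp : Int × Int) x =>
            (dp.1 * pvEvenCount x + dp.2 * pvOddCount x, dp.1 * pvOddCount x + dp.2 * pvEvenCount x))
          (a, b)).1 - (l.foldl
          (fun (dp : Int × Int) x =>
            (dp.1 * pvEvenCount x + dp.2 * pvOddCount x, dp.1 * pvOddCount x + dp.2 * pvEvenCount x))
          (a, b)).2) := by
  induction l generalizing a b with
  | nil => simp
  | cons x l ih =>
    rw [List.foldl_cons, List.foldl_cons]
    have e1 : (a + b) * ((pvCountEO x).1 + (pvCountEO x).2)
        = (a * pvEvenCount x + b * pvOddCount x) + (a * pvOddCount x + b * pvEvenCount x) := by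
      simp [pvCountEO_eq]; ring
    have e2 : (a - b) * ((pvCountEO x).1 - (pvCountEO x).2)
        = (a * pvEvenCount x + b * pvOddCount x) - (a * pvOddCount x + b * pvEvenCount x) := by
      simp [pvCountEO_eq]; ring
    rw [e1, e2]
    exact ih _ _

-- ===== VERDICT (by name: the statement is the Claim_ definition above) =====
theorem solution_spec : Claim_equal_solution := by
  intro numbers _ _
  unfold Spec_solution solution solution_alt
  simp only []
  have h := pv_inv numbers 1 0
  norm_num at h
  rw [h]
  simp only []
  rw [PySem.Int.floordiv_eq_ediv_of_pos (by norm_num : (0:Int) < (2:Int))]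
  omega
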